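-- pv_equiv track=rewrite | github.com/josedanielgj/Error_profiles | mismatch.py | translateMD
-- ===== SOURCE A (Python) =====
-- def translateMD(cigarSeq, mdtag):
--
--     MDSeq = []
--
--     #translate mdtag to seqence
--     #remove all "^"
--     mdtag = mdtag.replace("^","")
-- #    print (mdtag)
--
--     var = []
--     for letter in mdtag:
--         #go through each variable in mdtag until you hit a letter
--         if letter.isdigit() == True:
--             var.append(letter)
--         elif letter.isdigit() == False:
--             if var:
--                 subtotal = "".join(var)
-- #                print (subtotal)
-- #                print (letter)
--                 subtotal = int(subtotal)
--                 MDSeq.append("".join(["M" for n in range(subtotal)]))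
--                 MDSeq.append(letter)
--
--                 var = []
--             else: #if var is empty
--                 MDSeq.append(letter)
--     #check if var is present
--     if var:
--         subtotal = "".join(var)
--         subtotal = int(subtotal)
--         MDSeq.append("".join(["M" for n in range(subtotal)]))
--
--
--     MDSeq = "".join(MDSeq)
--
--
--     newMDSeq = []
--     seqIndex = 0
--
--     #walk along each letter of the cigar sequence
--     for i, letter in enumerate(cigarSeq):
--         #first look for softclips
--         if letter == "S":
--             newMDSeq.append("*") #clips
--         elif letter == "M":
--             newMDSeq.append(MDSeq[seqIndex])
--             seqIndex+=1
--         elif letter == "D":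
--             newMDSeq.append(MDSeq[seqIndex].lower())
--             seqIndex+=1
--         elif letter == "I":
--             newMDSeq.append("I")
--
--
--
--     newMDSeq = "".join(newMDSeq)
--
--
--     return newMDSeq
-- ===== SOURCE B (Python) =====
-- def translateMD(cigarSeq, mdtag):
--     # Tokenize the MD tag (after dropping '^') into maximal digit runs and
--     # single other characters, kept UNEXPANDED (run-length form).
--     md = mdtag.replace("^", "")
--     toks = []
--     i = 0
--     while i < len(md):
--         if md[i].isdigit():
--             j = i
--             while j < len(md) and md[j].isdigit():
--                 j += 1
--             toks.append(md[i:j])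
--             i = j
--         else:
--             toks.append(md[i])
--             i += 1
--
--     # Walk the CIGAR, consuming reference bases lazily from the token list
--     # with a countdown counter; a digit-run token "n" stands for n matches.
--     ti, rem = 0, 0
--
--     def next_base():
--         nonlocal ti, rem
--         while rem == 0:
--             t = toks[ti]          # IndexError when the MD tag is exhausted, as in A
--             ti += 1
--             if t.isdigit():
--                 rem = int(t)
--             else:
--                 return t
--         rem -= 1
--         return "M"
--
--     out = []
--     for letter in cigarSeq:
--         if letter == "S":
--             out.append("*")
--         elif letter == "M":
--             out.append(next_base())
--         elif letter == "D":
--             out.append(next_base().lower())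
--         elif letter == "I":
--             out.append("I")
--     return "".join(out)
-- ===== Notes on version B (the rewrite author's own statement) =====
-- stated objective: alternative
-- what changed: A expands the MD tag into a full per-base string ('M'*n for every digit run) and indexes into it while walking the CIGAR; B never materializes that string: it keeps the MD tag as run-length tokens and consumes them lazily through a countdown counter while walking the CIGAR, so a digit run of value n costs O(digits) instead of O(n); Pre_ excludes exactly the inputs on which A raises IndexError (B raises IndexError there too).
import Mathlib
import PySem

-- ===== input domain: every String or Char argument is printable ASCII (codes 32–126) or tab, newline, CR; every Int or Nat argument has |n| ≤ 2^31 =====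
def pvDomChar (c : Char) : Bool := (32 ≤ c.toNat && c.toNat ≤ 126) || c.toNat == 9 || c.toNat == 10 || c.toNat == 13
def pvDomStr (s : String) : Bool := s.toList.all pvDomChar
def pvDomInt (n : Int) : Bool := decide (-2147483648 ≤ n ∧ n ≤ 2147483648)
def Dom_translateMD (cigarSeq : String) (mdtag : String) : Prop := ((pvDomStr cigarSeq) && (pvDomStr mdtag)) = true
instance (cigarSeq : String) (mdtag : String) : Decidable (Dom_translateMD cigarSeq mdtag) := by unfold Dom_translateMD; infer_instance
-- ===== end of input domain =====

-- B never builds A's expanded per-base MD string: it keeps the MD tag as run-length tokens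
-- and consumes them lazily through a countdown counter while walking the CIGAR; same return
-- value on every input A returns on (Pre_ excludes A's IndexError, where B raises too).

-- ===== PORT A =====
-- "".join(["M" for n in range(subtotal)])
def pvMRunA (subtotal : Int) : List Char :=
  (PySem.List.pyRange 0 subtotal 1).map (fun _ => 'M')

-- one step of A's first loop; state = (MDSeq, var), both lists as in A
def pvStepA (st : List (List Char) × List Char) (letter : Char) : List (List Char) × List Char :=
  if PySem.Chars.isdigit letter = true then (st.1, st.2 ++ [letter])
  else if st.2 ≠ [] then
    -- subtotal = int("".join(var)): always a nonempty digit string here, so ofChars? is some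
    (st.1 ++ [pvMRunA ((PySem.Int.ofChars? st.2).getD 0), [letter]], [])
  else (st.1 ++ [[letter]], [])

-- the first loop plus the trailing "if var" flush, then "".join
def pvMDSeqA (mdtag : List Char) : List Char :=
  let st := mdtag.foldl pvStepA ([], [])
  (if st.2 ≠ [] then st.1 ++ [pvMRunA ((PySem.Int.ofChars? st.2).getD 0)] else st.1).flatten

-- one step of A's second loop; state = (newMDSeq, seqIndex); p.1 is enumerate's i, unused as in A
-- MDSeq[seqIndex]: pyGet? none = IndexError, excluded by Pre_ (.getD [] is never reached there)
def pvStepA2 (MDSeq : List Char) (st : List (List Char) × Int) (p : Int × Char) :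
    List (List Char) × Int :=
  if p.2 = 'S' then (st.1 ++ [['*']], st.2)
  else if p.2 = 'M' then
    (st.1 ++ [((PySem.List.pyGet? MDSeq st.2).map (fun c => [c])).getD []], st.2 + 1)
  else if p.2 = 'D' then
    (st.1 ++ [PySem.Chars.lower (((PySem.List.pyGet? MDSeq st.2).map (fun c => [c])).getD [])],
      st.2 + 1)
  else if p.2 = 'I' then (st.1 ++ [['I']], st.2)
  else st

def translateMD (cigarSeq : String) (mdtag : String) : String :=
  let MDSeq := pvMDSeqA (PySem.Str.replace mdtag "^" "").toList
  let st := (PySem.List.enumerate cigarSeq.toList).foldl (pvStepA2 MDSeq) ([], 0)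
  String.ofList st.1.flatten

-- ===== PORT B =====
-- B's tokenizer (the two while loops over index i): a maximal digit run md[i:j]
-- (inner while j = takeWhile) or a single other character; runs are kept UNEXPANDED
def pvTok : List Char → List (List Char)
  | [] => []
  | c :: rest =>
    if PySem.Chars.isdigit c = true then
      (c :: rest).takeWhile (fun d => PySem.Chars.isdigit d)
        :: pvTok ((c :: rest).dropWhile (fun d => PySem.Chars.isdigit d))
    else [c] :: pvTok rest
termination_by l => l.length
decreasing_by
  all_goals simp only [List.dropWhile_cons, *, if_pos, List.length_cons]
  · exact Nat.lt_succ_of_le (List.length_dropWhile_le _ _)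
  · exact Nat.lt_succ_of_le (Nat.le_refl _)

-- next_base(): the 'while rem == 0' loop pops tokens until a non-digit token or a
-- nonzero countdown; none = IndexError on toks[ti], excluded by Pre_
def pvNext : List (List Char) → Int → Option (List Char × List (List Char) × Int)
  | toks, rem =>
    if rem = 0 then
      match toks with
      | [] => none
      | t :: ts =>
        if PySem.Chars.strIsdigit t = true then pvNext ts ((PySem.Int.ofChars? t).getD 0)
        else some (t, ts, 0)
    else some (['M'], toks, rem - 1)
termination_by toks _ => toks.length

-- the CIGAR walk, consuming the run-length token state (toks, rem) via next_base()
def pvWalkRL : List Char → List (List Char) → Int → List (List Char)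
  | [], _, _ => []
  | c :: rest, toks, rem =>
    if c = 'S' then ['*'] :: pvWalkRL rest toks rem
    else if c = 'M' then
      match pvNext toks rem with
      | some (t, ts, r) => t :: pvWalkRL rest ts r
      | none => []
    else if c = 'D' then
      match pvNext toks rem with
      | some (t, ts, r) => PySem.Chars.lower t :: pvWalkRL rest ts r
      | none => []
    else if c = 'I' then ['I'] :: pvWalkRL rest toks rem
    else pvWalkRL rest toks rem

def translateMD_alt (cigarSeq : String) (mdtag : String) : String :=
  String.ofList
    (pvWalkRL cigarSeq.toList (pvTok (PySem.Str.replace mdtag "^" "").toList) 0).flatten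

-- ===== PRECONDITION & SPEC =====
-- number of reference bases the MD tag describes ('^' ignored, a digit run n describes n
-- matches, any other character one base); var is the pending digit run
def pvMdLen : List Char → List Char → Nat
  | var, [] => ((PySem.Int.ofChars? var).getD 0).toNat
  | var, c :: rest =>
    if c = '^' then pvMdLen var rest
    else if PySem.Chars.isdigit c = true then pvMdLen (var ++ [c]) rest
    else ((PySem.Int.ofChars? var).getD 0).toNat + 1 + pvMdLen [] rest

-- Pre_ excludes exactly the inputs on which A raises IndexError (and B IndexError too):
-- the CIGAR's M/D operations may not demand more bases than the MD tag describes.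
def Pre_translateMD (cigarSeq : String) (mdtag : String) : Prop :=
  cigarSeq.toList.countP (fun c => decide (c = 'M' ∨ c = 'D')) ≤ pvMdLen [] mdtag.toList

instance (cigarSeq : String) (mdtag : String) : Decidable (Pre_translateMD cigarSeq mdtag) := by
  unfold Pre_translateMD; infer_instance

def pvWitness_translateMD : String × String := ("SMMDIS", "2A0")

def Spec_translateMD (cigarSeq : String) (mdtag : String) (out : String) : Prop :=
  out = translateMD_alt cigarSeq mdtag
instance (cigarSeq : String) (mdtag : String) (out : String) :
    Decidable (Spec_translateMD cigarSeq mdtag out) := by unfold Spec_translateMD; infer_instance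

-- ===== CLAIM (what is proved, stated in full; the proofs are below) =====
def Claim_equal_translateMD : Prop := ∀ (cigarSeq : String) (mdtag : String),
  Dom_translateMD cigarSeq mdtag → Pre_translateMD cigarSeq mdtag →
  Spec_translateMD cigarSeq mdtag (translateMD cigarSeq mdtag)

-- ===== LEMMAS AND PROOFS =====

-- str.replace(s, "^", "") removes exactly the '^' characters
theorem pv_replace_go_filter (fuel : Nat) : ∀ (l acc : List Char), l.length ≤ fuel →
    PySem.Chars.replace.go ['^'] [] fuel l acc =
      acc.reverse ++ l.filter (fun c => !(c == '^')) := by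
  induction fuel with
  | zero =>
    intro l acc h
    have : l = [] := List.eq_nil_of_length_eq_zero (Nat.le_zero.mp h)
    subst this
    simp [PySem.Chars.replace.go]
  | succ n ih =>
    intro l acc h
    cases l with
    | nil => simp [PySem.Chars.replace.go]
    | cons c t =>
      have ht : t.length ≤ n := by simpa using h
      by_cases hc : c = '^'
      · subst hc
        rw [PySem.Chars.replace.go]
        simp only [List.isPrefixOf, BEq.rfl, Bool.and_self, if_pos, List.reverse_nil,
          List.nil_append, List.length_cons, List.drop_succ_cons, List.length_nil, List.drop_zero]
        rw [ih t acc ht]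
        simp
      · rw [PySem.Chars.replace.go]
        have hpre : List.isPrefixOf ['^'] (c :: t) = false := by
          simp [List.isPrefixOf]
          exact fun hx => hc hx.symm
        rw [hpre]
        simp only [Bool.false_eq_true, if_false]
        rw [ih t (c :: acc) ht]
        simp [hc]

theorem pv_replace_filter (s : List Char) :
    PySem.Chars.replace s ['^'] [] = s.filter (fun c => !(c == '^')) := by
  rw [PySem.Chars.replace]
  simp only [List.isEmpty_cons, Bool.false_eq_true, if_false]
  rw [pv_replace_go_filter s.length s [] (Nat.le_refl _)]
  simp

-- A's M-run is a replicate
theorem pv_mrunA_eq (n : Int) : pvMRunA n = List.replicate n.toNat 'M' := by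
  unfold pvMRunA
  rw [PySem.List.pyRange_one]
  rw [List.map_map]
  have : ((fun _ => 'M') ∘ fun k : Nat => (0 : Int) + k) = Function.const Nat 'M' := rfl
  rw [this, List.map_const, List.length_range]
  norm_num

theorem pv_takeWhile_digits (vs : List Char)
    (h : ∀ x ∈ vs, PySem.Chars.isdigit x = true) :
    vs.takeWhile (fun d => PySem.Chars.isdigit d) = vs :=
  List.takeWhile_eq_self_iff.mpr h

theorem pv_dropWhile_digits (vs : List Char)
    (h : ∀ x ∈ vs, PySem.Chars.isdigit x = true) :
    vs.dropWhile (fun d => PySem.Chars.isdigit d) = [] :=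
  List.dropWhile_eq_nil_iff.mpr (fun x hx => h x hx)

-- tokenizing a non-digit character: a singleton token
theorem pv_tok_nondigit (c : Char) (d : List Char) (hc : PySem.Chars.isdigit c = false) :
    pvTok (c :: d) = [c] :: pvTok d := by
  rw [pvTok]
  simp [hc]

-- tokenizing a nonempty all-digit run terminated by a non-digit
theorem pv_tok_flush (var : List Char) (c : Char) (d : List Char)
    (hv : ∀ x ∈ var, PySem.Chars.isdigit x = true) (hne : var ≠ [])
    (hc : PySem.Chars.isdigit c = false) :
    pvTok (var ++ c :: d) = var :: [c] :: pvTok d := by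
  cases var with
  | nil => exact absurd rfl hne
  | cons v vs =>
    have hv0 : PySem.Chars.isdigit v = true := hv v (List.mem_cons_self)
    have htake : ((v :: vs) ++ c :: d).takeWhile (fun x => PySem.Chars.isdigit x) = v :: vs := by
      rw [List.takeWhile_append]
      rw [pv_takeWhile_digits (v :: vs) hv]
      simp [hc]
    have hdrop : ((v :: vs) ++ c :: d).dropWhile (fun x => PySem.Chars.isdigit x) = c :: d := by
      rw [List.dropWhile_append]
      rw [pv_dropWhile_digits (v :: vs) hv]
      simp [hc]
    rw [List.cons_append, pvTok]
    simp only [hv0, if_pos, ← List.cons_append]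
    rw [htake, hdrop, pv_tok_nondigit c d hc]

-- tokenizing a (possibly empty) all-digit list
theorem pv_tok_digits (var : List Char)
    (hv : ∀ x ∈ var, PySem.Chars.isdigit x = true) :
    pvTok var = if var = [] then [] else [var] := by
  cases var with
  | nil => simp [pvTok]
  | cons v vs =>
    have hv0 : PySem.Chars.isdigit v = true := hv v (List.mem_cons_self)
    rw [pvTok]
    simp only [hv0, if_pos]
    rw [pv_takeWhile_digits (v :: vs) hv, pv_dropWhile_digits (v :: vs) hv]
    simp [pvTok]

-- the expansion of one token: what A's phase 1 appends for it (proof-side only;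
-- B itself never builds this string)
def pvEmit (t : List Char) : List Char :=
  if PySem.Chars.strIsdigit t = true then
    List.replicate ((PySem.Int.ofChars? t).getD 0).toNat 'M'
  else t

def pvMDSeqB (md : List Char) : List Char := ((pvTok md).map pvEmit).flatten

-- expanding a nonempty digit-run token is A's M-run
theorem pv_emit_digits (var : List Char)
    (hv : ∀ x ∈ var, PySem.Chars.isdigit x = true) (hne : var ≠ []) :
    pvEmit var = pvMRunA ((PySem.Int.ofChars? var).getD 0) := by
  unfold pvEmit
  rw [pv_mrunA_eq]
  have : PySem.Chars.strIsdigit var = true := by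
    unfold PySem.Chars.strIsdigit
    simp [hne, List.all_eq_true]
    exact hv
  rw [this]
  simp

-- expanding a singleton non-digit token leaves it as is
theorem pv_emit_nondigit (c : Char) (hc : PySem.Chars.isdigit c = false) :
    pvEmit [c] = [c] := by
  unfold pvEmit
  have : PySem.Chars.strIsdigit [c] = false := by
    unfold PySem.Chars.strIsdigit
    simp [hc]
  rw [this]
  simp

-- A's trailing "if var" flush + join, as a function of the loop state
def pvFin (st : List (List Char) × List Char) : List Char :=
  (if st.2 ≠ [] then st.1 ++ [pvMRunA ((PySem.Int.ofChars? st.2).getD 0)] else st.1).flatten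

theorem pv_ofChars_nil : PySem.Int.ofChars? ([] : List Char) = none := by decide

-- A's fold with pending digit run var = tokenize-then-expand of var ++ remaining input
theorem pv_phase1 (d : List Char) : ∀ (var : List Char) (acc : List (List Char)),
    (∀ x ∈ var, PySem.Chars.isdigit x = true) →
    pvFin (d.foldl pvStepA (acc, var)) =
      acc.flatten ++ ((pvTok (var ++ d)).map pvEmit).flatten := by
  induction d with
  | nil =>
    intro var acc hv
    by_cases hne : var = []
    · subst hne
      simp [pvFin, pvTok]
    · simp only [List.foldl_nil, List.append_nil]
      rw [pv_tok_digits var hv]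
      simp only [hne, if_false]
      rw [pvFin]
      simp only [hne, ne_eq, not_false_iff, if_pos]
      simp [pv_emit_digits var hv hne]
  | cons c d' ih =>
    intro var acc hv
    by_cases hc : PySem.Chars.isdigit c = true
    · have hstep : pvStepA (acc, var) c = (acc, var ++ [c]) := by
        unfold pvStepA
        simp [hc]
      rw [List.foldl_cons, hstep]
      rw [ih (var ++ [c]) acc (by
        intro x hx
        rcases List.mem_append.mp hx with h | h
        · exact hv x h
        · simp at h; subst h; exact hc)]
      rw [List.append_assoc]
      simp
    · have hc' : PySem.Chars.isdigit c = false := by simpa using hc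
      by_cases hne : var = []
      · subst hne
        have hstep : pvStepA (acc, ([] : List Char)) c = (acc ++ [[c]], []) := by
          unfold pvStepA
          simp [hc']
        rw [List.foldl_cons, hstep, ih [] (acc ++ [[c]]) (by simp)]
        simp only [List.nil_append]
        rw [pv_tok_nondigit c d' hc']
        simp [pv_emit_nondigit c hc']
      · have hstep : pvStepA (acc, var) c =
            (acc ++ [pvMRunA ((PySem.Int.ofChars? var).getD 0), [c]], []) := by
          unfold pvStepA
          simp [hc', hne]
        rw [List.foldl_cons, hstep, ih [] _ (by simp)]
        rw [List.nil_append, pv_tok_flush var c d' hv hne hc']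
        simp [pv_emit_digits var hv hne, pv_emit_nondigit c hc']

-- pvMdLen ignores '^' like the ports do
theorem pv_mdlen_filter (d : List Char) : ∀ var,
    pvMdLen var d = pvMdLen var (d.filter (fun c => !(c == '^'))) := by
  induction d with
  | nil => intro var; simp
  | cons c d' ih =>
    intro var
    by_cases hc : c = '^'
    · subst hc
      rw [pvMdLen]
      rw [if_pos rfl, ih var, List.filter_cons]
      norm_num
    · have hbc : (!(c == '^')) = true := by simp [hc]
      rw [List.filter_cons, hbc, if_pos rfl]
      rw [pvMdLen, pvMdLen, if_neg hc, if_neg hc]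
      by_cases hd : PySem.Chars.isdigit c = true
      · rw [if_pos hd, if_pos hd, ih (var ++ [c])]
      · rw [if_neg hd, if_neg hd, ih []]

-- pvMdLen is the length of the expanded MD string
theorem pv_mdlen_eq (d : List Char) : ∀ (var : List Char),
    (∀ x ∈ var, PySem.Chars.isdigit x = true) →
    (∀ x ∈ d, x ≠ '^') →
    pvMdLen var d = (((pvTok (var ++ d)).map pvEmit).flatten).length := by
  induction d with
  | nil =>
    intro var hv _
    rw [pvMdLen]
    by_cases hne : var = []
    · subst hne; simp [pvTok, pv_ofChars_nil]
    · rw [List.append_nil, pv_tok_digits var hv]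
      simp only [hne, if_false]
      simp [pv_emit_digits var hv hne, pv_mrunA_eq]
  | cons c d' ih =>
    intro var hv hnh
    have hnh' : ∀ x ∈ d', x ≠ '^' := fun x hx => hnh x (List.mem_cons_of_mem _ hx)
    have hcne : ¬ c = '^' := hnh c List.mem_cons_self
    by_cases hc : PySem.Chars.isdigit c = true
    · rw [pvMdLen]
      simp only [hcne, hc, if_pos, if_false]
      rw [ih (var ++ [c]) (by
        intro x hx
        rcases List.mem_append.mp hx with h | h
        · exact hv x h
        · simp at h; subst h; exact hc) hnh']
      rw [List.append_assoc]
      simp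
    · have hc' : PySem.Chars.isdigit c = false := by simpa using hc
      rw [pvMdLen]
      simp only [hcne, hc', Bool.false_eq_true, if_false]
      rw [ih [] (by simp) hnh', List.nil_append]
      by_cases hne : var = []
      · subst hne
        rw [List.nil_append, pv_tok_nondigit c d' hc']
        simp [pv_emit_nondigit c hc', pv_ofChars_nil]
        omega
      · rw [pv_tok_flush var c d' hv hne hc']
        simp [pv_emit_digits var hv hne, pv_emit_nondigit c hc', pv_mrunA_eq]
        omega

-- the enumerate index is unused by A's second loop
theorem pv_foldl_enum (M : List Char) (xs : List Char) : ∀ (s : Int) (init : List (List Char) × Int),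
    (PySem.List.enumerate xs s).foldl (pvStepA2 M) init =
      xs.foldl (fun st c => pvStepA2 M st (0, c)) init := by
  induction xs with
  | nil => intro s init; simp [PySem.List.enumerate]
  | cons x xs ih =>
    intro s init
    rw [PySem.List.enumerate_cons, List.foldl_cons, List.foldl_cons, ih]
    rfl

-- proof-side character-iterator walk bridging A's index cursor and B's run-length state
def pvWalkB : List Char → List Char → List Char
  | [], _ => []
  | c :: rest, it =>
    if c = 'S' then '*' :: pvWalkB rest it
    else if c = 'M' then
      match it with
      | x :: it' => x :: pvWalkB rest it'
      | [] => []
    else if c = 'D' then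
      match it with
      | x :: it' => PySem.Chars.lowerChar x :: pvWalkB rest it'
      | [] => []
    else if c = 'I' then 'I' :: pvWalkB rest it
    else pvWalkB rest it

-- evaluation lemmas for pvWalkB, one per CIGAR letter
theorem pv_walkB_nil (it : List Char) : pvWalkB [] it = [] := by simp [pvWalkB]

theorem pv_walkB_S (rest it : List Char) : pvWalkB ('S' :: rest) it = '*' :: pvWalkB rest it := by
  simp [pvWalkB]

theorem pv_walkB_M (rest : List Char) (x : Char) (it : List Char) :
    pvWalkB ('M' :: rest) (x :: it) = x :: pvWalkB rest it := by
  simp [pvWalkB]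

theorem pv_walkB_D (rest : List Char) (x : Char) (it : List Char) :
    pvWalkB ('D' :: rest) (x :: it) = PySem.Chars.lowerChar x :: pvWalkB rest it := by
  simp [pvWalkB]

theorem pv_walkB_M_nil (rest : List Char) : pvWalkB ('M' :: rest) [] = [] := by simp [pvWalkB]

theorem pv_walkB_D_nil (rest : List Char) : pvWalkB ('D' :: rest) [] = [] := by simp [pvWalkB]

theorem pv_walkB_I (rest it : List Char) : pvWalkB ('I' :: rest) it = 'I' :: pvWalkB rest it := by
  simp [pvWalkB]

theorem pv_walkB_other (c : Char) (rest it : List Char) (h1 : ¬ c = 'S') (h2 : ¬ c = 'M')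
    (h3 : ¬ c = 'D') (h4 : ¬ c = 'I') : pvWalkB (c :: rest) it = pvWalkB rest it := by
  simp [pvWalkB, h1, h2, h3, h4]

-- the CIGAR walk: A's index cursor = iterator over the rest of the expanded string
theorem pv_walk (M : List Char) (cig : List Char) : ∀ (k : Nat) (acc : List (List Char)),
    cig.countP (fun c => decide (c = 'M' ∨ c = 'D')) + k ≤ M.length →
    ((cig.foldl (fun st c => pvStepA2 M st (0, c)) (acc, (k : Int))).1).flatten =
      acc.flatten ++ pvWalkB cig (M.drop k) := by
  induction cig with
  | nil => intro k acc h; simp [pv_walkB_nil]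
  | cons c rest ih =>
    intro k acc h
    rw [List.foldl_cons]
    by_cases hS : c = 'S'
    · subst hS
      have hstep : pvStepA2 M (acc, (k : Int)) (0, 'S') = (acc ++ [['*']], (k : Int)) := by
        unfold pvStepA2; simp
      rw [hstep, ih k (acc ++ [['*']]) (by simp [] at h ⊢; omega)]
      rw [pv_walkB_S]
      simp
    · by_cases hM : c = 'M'
      · subst hM
        have hk : k < M.length := by simp [] at h; omega
        have hget : PySem.List.pyGet? M ((k : Nat) : Int) = some (M[k]) := by
          rw [PySem.List.pyGet?_natCast]; exact List.getElem?_eq_getElem hk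
        have hstep : pvStepA2 M (acc, (k : Int)) (0, 'M') =
            (acc ++ [[M[k]]], (k : Int) + 1) := by
          unfold pvStepA2; simp [hget]
        have hcast : ((k : Int) + 1) = (((k + 1 : Nat)) : Int) := by push_cast; ring
        rw [hstep, hcast, ih (k + 1) (acc ++ [[M[k]]])
          (by simp [] at h ⊢; omega)]
        rw [← List.getElem_cons_drop hk, pv_walkB_M]
        simp
      · by_cases hD : c = 'D'
        · subst hD
          have hk : k < M.length := by simp [] at h; omega
          have hget : PySem.List.pyGet? M ((k : Nat) : Int) = some (M[k]) := by
            rw [PySem.List.pyGet?_natCast]; exact List.getElem?_eq_getElem hk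
          have hstep : pvStepA2 M (acc, (k : Int)) (0, 'D') =
              (acc ++ [[PySem.Chars.lowerChar M[k]]], (k : Int) + 1) := by
            unfold pvStepA2; simp [hget, PySem.Chars.lower]
          have hcast : ((k : Int) + 1) = (((k + 1 : Nat)) : Int) := by push_cast; ring
          rw [hstep, hcast, ih (k + 1) (acc ++ [[PySem.Chars.lowerChar M[k]]])
            (by simp [] at h ⊢; omega)]
          rw [← List.getElem_cons_drop hk, pv_walkB_D]
          simp
        · by_cases hI : c = 'I'
          · subst hI
            have hstep : pvStepA2 M (acc, (k : Int)) (0, 'I') = (acc ++ [['I']], (k : Int)) := by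
              unfold pvStepA2; simp
            rw [hstep, ih k (acc ++ [['I']]) (by simp [] at h ⊢; omega)]
            rw [pv_walkB_I]
            simp
          · have hstep : pvStepA2 M (acc, (k : Int)) (0, c) = (acc, (k : Int)) := by
              unfold pvStepA2; simp [hS, hM, hD, hI]
            rw [hstep, ih k acc (by simp [hM, hD] at h ⊢; omega)]
            rw [pv_walkB_other c rest _ hS hM hD hI]

-- ===== new lemmas: the run-length walk equals the iterator walk over the expansion =====

-- a digit is not an int() space character
theorem pv_digit_not_space (c : Char) (h : PySem.Chars.isdigit c = true) :
    PySem.Int.isIntSpace c = false := by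
  simp only [PySem.Chars.isdigit, Bool.and_eq_true, decide_eq_true_eq] at h
  obtain ⟨h1, _⟩ := h
  have h48 : 48 ≤ c.toNat := h1
  simp only [PySem.Int.isIntSpace, Bool.or_eq_false_iff, decide_eq_false_iff_not]
  refine ⟨⟨⟨⟨⟨?_, ?_⟩, ?_⟩, ?_⟩, ?_⟩, ?_⟩ <;> (rintro rfl; revert h48; decide)

theorem pv_dropWhile_no (p : Char → Bool) (l : List Char) (h : ∀ x ∈ l, p x = false) :
    List.dropWhile p l = l := by
  cases l with
  | nil => rfl
  | cons a l => exact List.dropWhile_cons_of_neg (by simp [h a List.mem_cons_self])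

-- the unsigned branch of int() yields a Nat, hence a nonnegative value
theorem pv_opt_nonneg (y : Option Nat) :
    0 ≤ (Option.map (fun n : Int => n) (y.bind fun a => pure ((a : Nat) : Int))).getD 0 := by
  cases y <;> simp

-- int() of a nonempty all-digit string is nonnegative (getD 0 view)
theorem pv_ofChars_digits_nonneg (t : List Char) (hd : ∀ x ∈ t, PySem.Chars.isdigit x = true)
    (hne : t ≠ []) : 0 ≤ (PySem.Int.ofChars? t).getD 0 := by
  obtain ⟨c, rest, rfl⟩ := List.exists_cons_of_ne_nil hne
  have hnos : ∀ x ∈ (c :: rest), PySem.Int.isIntSpace x = false :=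
    fun x hx => pv_digit_not_space x (hd x hx)
  have hstrip : (List.dropWhile PySem.Int.isIntSpace
      ((List.dropWhile PySem.Int.isIntSpace (c :: rest)).reverse)).reverse = c :: rest := by
    rw [pv_dropWhile_no _ _ hnos,
        pv_dropWhile_no _ _ (fun x hx => hnos x (List.mem_reverse.mp hx)),
        List.reverse_reverse]
  simp only [PySem.Int.ofChars?]
  rw [hstrip]
  split
  · exfalso
    have hc := hd c List.mem_cons_self
    simp_all [PySem.Chars.isdigit]
  · exfalso
    have hc := hd c List.mem_cons_self
    simp_all [PySem.Chars.isdigit]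
  · exact pv_opt_nonneg _

-- well-formed token: a digit run with nonnegative value, or a single character
def pvWFTok (t : List Char) : Prop :=
  if PySem.Chars.strIsdigit t = true then 0 ≤ (PySem.Int.ofChars? t).getD 0
  else ∃ x, t = [x]

-- every token the tokenizer produces is well-formed
theorem pv_tok_wf (md : List Char) : ∀ t ∈ pvTok md, pvWFTok t := by
  induction md using pvTok.induct with
  | case1 => intro t ht; simp [pvTok] at ht
  | case2 c rest hc ih =>
    intro t ht
    rw [pvTok] at ht
    simp only [hc, if_pos, List.mem_cons] at ht
    rcases ht with rfl | ht
    · have hall : ∀ x ∈ (c :: rest).takeWhile (fun d => PySem.Chars.isdigit d),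
          PySem.Chars.isdigit x = true := by
        intro x hx
        have := List.takeWhile_prefix (l := c :: rest) (p := fun d => PySem.Chars.isdigit d)
        exact List.mem_takeWhile_imp hx
      have hne : (c :: rest).takeWhile (fun d => PySem.Chars.isdigit d) ≠ [] := by
        rw [List.takeWhile_cons_of_pos (by simpa using hc)]
        simp
      unfold pvWFTok
      have hsd : PySem.Chars.strIsdigit ((c :: rest).takeWhile (fun d => PySem.Chars.isdigit d)) = true := by
        unfold PySem.Chars.strIsdigit
        simp [hne]
      rw [hsd]
      simp only [if_pos]
      exact pv_ofChars_digits_nonneg _ hall hne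
    · exact ih t ht
  | case3 c rest hc ih =>
    intro t ht
    rw [pvTok] at ht
    simp only [hc, Bool.false_eq_true, if_false, List.mem_cons] at ht
    rcases ht with rfl | ht
    · unfold pvWFTok
      have : PySem.Chars.strIsdigit [c] = false := by
        unfold PySem.Chars.strIsdigit
        simp [hc]
      rw [this]
      simp
    · exact ih t ht

-- next_base() takes exactly the head of the remaining expansion
theorem pv_next_spec (toks : List (List Char)) : ∀ (rem : Int),
    (∀ t ∈ toks, pvWFTok t) → 0 ≤ rem →
    ((pvNext toks rem = none →
        List.replicate rem.toNat 'M' ++ (toks.map pvEmit).flatten = []) ∧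
     (∀ t ts r, pvNext toks rem = some (t, ts, r) →
        (∀ u ∈ ts, pvWFTok u) ∧ 0 ≤ r ∧ (∃ x, t = [x]) ∧
        List.replicate rem.toNat 'M' ++ (toks.map pvEmit).flatten =
          t ++ (List.replicate r.toNat 'M' ++ (ts.map pvEmit).flatten))) := by
  induction toks with
  | nil =>
    intro rem _ hrem
    constructor
    · intro hnone
      rw [pvNext] at hnone
      by_cases h0 : rem = 0
      · subst h0; simp
      · simp [h0] at hnone
    · intro t ts r hsome
      rw [pvNext] at hsome
      by_cases h0 : rem = 0
      · simp [h0] at hsome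
      · simp only [h0, if_false, Option.some.injEq, Prod.mk.injEq] at hsome
        obtain ⟨h1, h2, h3⟩ := hsome
        subst h1; subst h2; subst h3
        refine ⟨by simp, by omega, ⟨'M', rfl⟩, ?_⟩
        have hrw : rem.toNat = (rem - 1).toNat + 1 := by omega
        rw [hrw, List.replicate_succ]
        simp
  | cons t0 ts0 ih =>
    intro rem hwf hrem
    by_cases h0 : rem = 0
    · subst h0
      by_cases hd : PySem.Chars.strIsdigit t0 = true
      · have hv : 0 ≤ (PySem.Int.ofChars? t0).getD 0 := by
          have := hwf t0 List.mem_cons_self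
          unfold pvWFTok at this
          rwa [hd, if_pos rfl] at this
        have hrec : pvNext (t0 :: ts0) 0 = pvNext ts0 ((PySem.Int.ofChars? t0).getD 0) := by
          rw [pvNext]; simp [hd]
        have hemit : pvEmit t0 = List.replicate ((PySem.Int.ofChars? t0).getD 0).toNat 'M' := by
          unfold pvEmit; rw [hd]; simp
        have ihh := ih ((PySem.Int.ofChars? t0).getD 0)
          (fun u hu => hwf u (List.mem_cons_of_mem _ hu)) hv
        constructor
        · intro hnone
          rw [hrec] at hnone
          have h1 := ihh.1 hnone
          simpa [hemit] using h1
        · intro t ts r hsome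
          rw [hrec] at hsome
          obtain ⟨hwf2, hr, hx, heq⟩ := ihh.2 t ts r hsome
          refine ⟨hwf2, hr, hx, ?_⟩
          simp only [Int.toNat_zero, List.replicate_zero, List.nil_append, List.map_cons,
            List.flatten_cons, hemit]
          rw [heq]
      · have hstep : pvNext (t0 :: ts0) 0 = some (t0, ts0, 0) := by
          rw [pvNext]; simp [hd]
        constructor
        · intro hnone; rw [hstep] at hnone; exact absurd hnone (by simp)
        · intro t ts r hsome
          rw [hstep] at hsome
          simp only [Option.some.injEq, Prod.mk.injEq] at hsome
          obtain ⟨h1, h2, h3⟩ := hsome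
          subst h1; subst h2; subst h3
          have hx : ∃ x, t0 = [x] := by
            have := hwf t0 List.mem_cons_self
            unfold pvWFTok at this
            rwa [if_neg (by simp [hd])] at this
          refine ⟨fun u hu => hwf u (List.mem_cons_of_mem _ hu), le_refl 0, hx, ?_⟩
          have hemit : pvEmit t0 = t0 := by unfold pvEmit; simp [hd]
          simp [hemit]
    · have hstep : pvNext (t0 :: ts0) rem = some (['M'], t0 :: ts0, rem - 1) := by
        rw [pvNext]; simp [h0]
      constructor
      · intro hnone; rw [hstep] at hnone; exact absurd hnone (by simp)
      · intro t ts r hsome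
        rw [hstep] at hsome
        simp only [Option.some.injEq, Prod.mk.injEq] at hsome
        obtain ⟨h1, h2, h3⟩ := hsome
        subst h1; subst h2; subst h3
        refine ⟨hwf, by omega, ⟨'M', rfl⟩, ?_⟩
        have hrw : rem.toNat = (rem - 1).toNat + 1 := by omega
        rw [hrw, List.replicate_succ]
        simp

-- B's run-length walk = the iterator walk over the expanded MD string
theorem pv_bridge (cig : List Char) : ∀ (toks : List (List Char)) (rem : Int),
    (∀ t ∈ toks, pvWFTok t) → 0 ≤ rem →
    (pvWalkRL cig toks rem).flatten =
      pvWalkB cig (List.replicate rem.toNat 'M' ++ (toks.map pvEmit).flatten) := by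
  induction cig with
  | nil => intro toks rem _ _; simp [pvWalkRL, pv_walkB_nil]
  | cons c rest ih =>
    intro toks rem hwf hrem
    by_cases hS : c = 'S'
    · subst hS
      rw [pvWalkRL]
      simp only [if_pos]
      rw [pv_walkB_S, List.flatten_cons, ih toks rem hwf hrem]
      simp
    · by_cases hM : c = 'M'
      · subst hM
        rw [pvWalkRL]
        simp only [if_neg (by decide : ¬('M' = 'S')), if_pos]
        cases hnx : pvNext toks rem with
        | none =>
          have hnil := (pv_next_spec toks rem hwf hrem).1 hnx
          rw [hnil, pv_walkB_M_nil]
          simp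
        | some res =>
          obtain ⟨t, ts, r⟩ := res
          obtain ⟨hwf', hr, ⟨x, rfl⟩, heq⟩ := (pv_next_spec toks rem hwf hrem).2 t ts r hnx
          rw [heq, List.cons_append, pv_walkB_M, List.flatten_cons, ih ts r hwf' hr]
          simp
      · by_cases hD : c = 'D'
        · subst hD
          rw [pvWalkRL]
          simp only [if_neg (by decide : ¬('D' = 'S')), if_neg (by decide : ¬('D' = 'M')), if_pos]
          cases hnx : pvNext toks rem with
          | none =>
            have hnil := (pv_next_spec toks rem hwf hrem).1 hnx
            rw [hnil, pv_walkB_D_nil]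
            simp
          | some res =>
            obtain ⟨t, ts, r⟩ := res
            obtain ⟨hwf', hr, ⟨x, rfl⟩, heq⟩ := (pv_next_spec toks rem hwf hrem).2 t ts r hnx
            rw [heq, List.cons_append, pv_walkB_D, List.flatten_cons, ih ts r hwf' hr]
            simp [PySem.Chars.lower]
        · by_cases hI : c = 'I'
          · subst hI
            rw [pvWalkRL]
            simp only [if_neg (by decide : ¬('I' = 'S')), if_neg (by decide : ¬('I' = 'M')),
              if_neg (by decide : ¬('I' = 'D')), if_pos]
            rw [pv_walkB_I, List.flatten_cons, ih toks rem hwf hrem]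
            simp
          · rw [pvWalkRL]
            simp only [if_neg hS, if_neg hM, if_neg hD, if_neg hI]
            rw [pv_walkB_other c rest _ hS hM hD hI, ih toks rem hwf hrem]

-- ===== VERDICT (by name: the statement is the Claim_ definition above) =====
theorem translateMD_spec : Claim_equal_translateMD := by
  unfold Claim_equal_translateMD
  intro cig md _ hpre
  unfold Spec_translateMD translateMD translateMD_alt
  have hrep : (PySem.Str.replace md "^" "").toList = md.toList.filter (fun c => !(c == '^')) := by
    rw [PySem.Str.toList_replace]
    exact pv_replace_filter md.toList
  rw [hrep]
  have hnh : ∀ x ∈ md.toList.filter (fun c => !(c == '^')), x ≠ '^' := by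
    intro x hx
    have := List.of_mem_filter hx
    simpa using this
  have hMD : pvMDSeqA (md.toList.filter (fun c => !(c == '^'))) =
      pvMDSeqB (md.toList.filter (fun c => !(c == '^'))) := by
    unfold pvMDSeqA pvMDSeqB
    have h1 := pv_phase1 (md.toList.filter (fun c => !(c == '^'))) [] [] (by simp)
    simpa [pvFin] using h1
  have hlen : pvMdLen [] md.toList = (pvMDSeqB (md.toList.filter (fun c => !(c == '^')))).length := by
    rw [pv_mdlen_filter md.toList []]
    rw [pv_mdlen_eq (md.toList.filter (fun c => !(c == '^'))) [] (by simp) hnh]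
    rfl
  unfold Pre_translateMD at hpre
  rw [hlen, ← hMD] at hpre
  -- A's side: index walk = iterator walk over the expanded string
  show String.ofList
      ((PySem.List.enumerate cig.toList).foldl
        (pvStepA2 (pvMDSeqA (md.toList.filter (fun c => !(c == '^'))))) ([], 0)).1.flatten = _
  rw [pv_foldl_enum]
  have hw := pv_walk (pvMDSeqA (md.toList.filter (fun c => !(c == '^')))) cig.toList 0 []
    (by omega)
  simp only [Nat.cast_zero, List.drop_zero, List.flatten_nil, List.nil_append] at hw
  rw [hw]
  -- B's side: run-length walk = iterator walk over the same expanded string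
  have hb := pv_bridge cig.toList (pvTok (md.toList.filter (fun c => !(c == '^')))) 0
    (pv_tok_wf _) (le_refl 0)
  simp only [Int.toNat_zero, List.replicate_zero, List.nil_append] at hb
  rw [hb]
  rw [hMD]
  rfl
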